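-- pv_equiv track=rewrite | github.com/TwitchyMcJoe/NISABA | widgets/translation_tab.py | apply_conjugation_for_token
-- ===== SOURCE A (Python) =====
-- def apply_conjugation_for_token(con_word, english_token, conjugations, tense):
--     """
--     Apply conjugation using the selected tense.
--     Prefers matching by the English token (row['english'] == english_token).
--     If not found, attempts matching by base == conlang base.
--     """
--     # 1) Try English match
--     for row in conjugations:
--         if (row.get("english") or "").lower() == (english_token or "").lower():
--             val = row.get(tense, "") or ""
--             return val if val else con_word
--
--     # 2) Fallback: match by conlang base
--     for row in conjugations:
--         if (row.get("base") or "").lower() == (con_word or "").lower():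
--             val = row.get(tense, "") or ""
--             return val if val else con_word
--
--     return con_word
-- ===== SOURCE B (Python) =====
-- def apply_conjugation_for_token(con_word, english_token, conjugations, tense):
--     """Index-based: one pass builds first-match dictionaries keyed by lowered
--     english and lowered base; the answer is then two dictionary lookups."""
--     eng_index = {}
--     base_index = {}
--     for row in conjugations:
--         resolved = (row.get(tense, "") or "") or con_word
--         eng_index.setdefault((row.get("english") or "").lower(), resolved)
--         base_index.setdefault((row.get("base") or "").lower(), resolved)
--     key = (english_token or "").lower()
--     if key in eng_index:
--         return eng_index[key]
--     return base_index.get((con_word or "").lower(), con_word)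
-- ===== Notes on version B (the rewrite author's own statement) =====
-- stated objective: alternative
-- what changed: Replaces A's two sequential scans over conjugations with a single indexing pass that builds first-match dictionaries keyed by lowered english and lowered base, so the answer becomes two O(1) dictionary lookups.
import Mathlib
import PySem

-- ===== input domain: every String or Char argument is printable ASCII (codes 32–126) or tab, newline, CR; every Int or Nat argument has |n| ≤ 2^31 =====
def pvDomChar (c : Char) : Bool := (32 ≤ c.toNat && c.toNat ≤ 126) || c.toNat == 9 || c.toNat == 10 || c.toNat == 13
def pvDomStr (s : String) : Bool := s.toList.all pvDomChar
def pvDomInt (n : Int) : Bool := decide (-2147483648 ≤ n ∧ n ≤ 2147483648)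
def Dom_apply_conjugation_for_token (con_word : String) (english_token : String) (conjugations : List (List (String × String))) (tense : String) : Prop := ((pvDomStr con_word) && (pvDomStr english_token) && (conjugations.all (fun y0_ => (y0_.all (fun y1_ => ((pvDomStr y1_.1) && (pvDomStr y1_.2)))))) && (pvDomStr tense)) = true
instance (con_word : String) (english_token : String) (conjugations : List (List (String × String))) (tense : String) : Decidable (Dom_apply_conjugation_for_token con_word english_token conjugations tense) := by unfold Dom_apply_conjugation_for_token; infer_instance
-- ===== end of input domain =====

-- B replaces A's two sequential scans with one indexing pass that builds
-- first-match dictionaries keyed by lowered english/base, then two lookups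
-- (objective: alternative; same asymptotic cost).

-- ===== PORT A =====
-- row.get(k) or "" / row.get(k, "") or "": first-match lookup, default "" (empty stays empty)
def pvRowGet (row : List (String × String)) (k : String) : String :=
  (PySem.Dict.mk row).getD k ""

-- one of A's scan loops: return on first row whose `key` field (lowered) equals `target`
def pvScanA (key target con_word tense : String) : List (List (String × String)) → Option String
  | [] => none
  | row :: rest =>
      if PySem.Str.lower (pvRowGet row key) == target then
        some (let val := pvRowGet row tense; if val == "" then con_word else val)
      else pvScanA key target con_word tense rest

def apply_conjugation_for_token (con_word : String) (english_token : String) (conjugations : List (List (String × String))) (tense : String) : String :=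
  match pvScanA "english" (PySem.Str.lower english_token) con_word tense conjugations with
  | some r => r
  | none =>
    match pvScanA "base" (PySem.Str.lower con_word) con_word tense conjugations with
    | some r => r
    | none => con_word

-- ===== PORT B =====
-- one step of B's indexing loop: setdefault keeps the FIRST resolved value per key
def pvStepB (con_word tense : String)
    (acc : PySem.Dict String String × PySem.Dict String String)
    (row : List (String × String)) :
    PySem.Dict String String × PySem.Dict String String :=
  let v := (PySem.Dict.mk row).getD tense ""
  let resolved := if v == "" then con_word else v
  (acc.1.setdefault (PySem.Str.lower ((PySem.Dict.mk row).getD "english" "")) resolved,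
   acc.2.setdefault (PySem.Str.lower ((PySem.Dict.mk row).getD "base" "")) resolved)

-- the indexing pass: fold all rows into the (english, base) index pair
def pvIndexB (con_word tense : String) (rows : List (List (String × String))) :
    PySem.Dict String String × PySem.Dict String String :=
  rows.foldl (pvStepB con_word tense) (PySem.Dict.empty, PySem.Dict.empty)

def apply_conjugation_for_token_alt (con_word : String) (english_token : String) (conjugations : List (List (String × String))) (tense : String) : String :=
  match (pvIndexB con_word tense conjugations).1.get? (PySem.Str.lower english_token) with
  | some r => r
  | none => (pvIndexB con_word tense conjugations).2.getD (PySem.Str.lower con_word) con_word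

-- ===== PRECONDITION & SPEC =====
def Spec_apply_conjugation_for_token (con_word : String) (english_token : String) (conjugations : List (List (String × String))) (tense : String) (out : String) : Prop := out = apply_conjugation_for_token_alt con_word english_token conjugations tense
instance (con_word : String) (english_token : String) (conjugations : List (List (String × String))) (tense : String) (out : String) : Decidable (Spec_apply_conjugation_for_token con_word english_token conjugations tense out) := by unfold Spec_apply_conjugation_for_token; infer_instance

-- ===== CLAIM (what is proved, stated in full; the proofs are below) =====
def Claim_equal_apply_conjugation_for_token : Prop := ∀ (con_word : String) (english_token : String) (conjugations : List (List (String × String))) (tense : String), Dom_apply_conjugation_for_token con_word english_token conjugations tense → Spec_apply_conjugation_for_token con_word english_token conjugations tense (apply_conjugation_for_token con_word english_token conjugations tense)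

-- ===== LEMMAS AND PROOFS =====
-- lookup in items ++ [(k,v)]: first match in items, else the appended pair
lemma get?_mk_append (items : List (String × String)) (k v k' : String) :
    (PySem.Dict.mk (items ++ [(k, v)])).get? k' =
      match (PySem.Dict.mk items).get? k' with
      | some w => some w
      | none => if k = k' then some v else none := by
  induction items with
  | nil =>
    rw [List.nil_append, PySem.Dict.get?_mk_cons]
    by_cases hk : k = k' <;> simp [hk, PySem.Dict.get?]
  | cons p rest ih =>
    rw [show (p :: rest) ++ [(k, v)] = (p.1, p.2) :: (rest ++ [(k, v)]) by cases p; rfl]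
    rw [PySem.Dict.get?_mk_cons, show (p :: rest) = ((p.1, p.2) :: rest) by cases p; rfl,
        PySem.Dict.get?_mk_cons]
    by_cases hp : p.1 == k'
    · simp [hp]
    · simp [hp, ih]

-- setdefault appends only when the key is absent; lookup falls through to the new pair
lemma get?_setdefault (d : PySem.Dict String String) (k v k' : String) :
    (d.setdefault k v).get? k' =
      match d.get? k' with
      | some w => some w
      | none => if k = k' then some v else none := by
  simp only [PySem.Dict.setdefault]
  split
  · rename_i h
    cases hg : d.get? k' with
    | some w => simp
    | none =>
      simp only []
      by_cases hk : k = k'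
      · subst hk
        have := PySem.Dict.get?_eq_none_iff_contains (d := d) (k := k)
        simp [hg] at this
        simp [this] at h
      · simp [hk]
  · exact get?_mk_append d.items k v k'

-- at the bottom we use the pure list form: appending one pair falls through the existing items


-- the first component of B's indexing fold looks up as A's english scan (below any prior dict)
lemma foldl_fst_get (con_word tense k : String) :
    ∀ (rows : List (List (String × String))) (d : PySem.Dict String String × PySem.Dict String String),
      ((rows.foldl (pvStepB con_word tense) d).1).get? k =
        match d.1.get? k with
        | some w => some w
        | none => pvScanA "english" k con_word tense rows := by
  intro rows
  induction rows with
  | nil => intro d; cases hg : d.1.get? k <;> simp [pvScanA, hg]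
  | cons row rest ih =>
    intro d
    simp only [List.foldl_cons, ih, pvStepB, get?_setdefault, pvScanA, pvRowGet]
    cases hg : d.1.get? k with
    | some w => simp
    | none =>
      simp only []
      by_cases he : PySem.Str.lower ((PySem.Dict.mk row).getD "english" "") = k
      · simp [he]
      · simp [he]

-- and the second component as A's base scan
lemma foldl_snd_get (con_word tense k : String) :
    ∀ (rows : List (List (String × String))) (d : PySem.Dict String String × PySem.Dict String String),
      ((rows.foldl (pvStepB con_word tense) d).2).get? k =
        match d.2.get? k with
        | some w => some w
        | none => pvScanA "base" k con_word tense rows := by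
  intro rows
  induction rows with
  | nil => intro d; cases hg : d.2.get? k <;> simp [pvScanA, hg]
  | cons row rest ih =>
    intro d
    simp only [List.foldl_cons, ih, pvStepB, get?_setdefault, pvScanA, pvRowGet]
    cases hg : d.2.get? k with
    | some w => simp
    | none =>
      simp only []
      by_cases he : PySem.Str.lower ((PySem.Dict.mk row).getD "base" "") = k
      · simp [he]
      · simp [he]

-- ===== VERDICT (by name: the statement is the Claim_ definition above) =====
theorem apply_conjugation_for_token_spec : Claim_equal_apply_conjugation_for_token := by
  intro con_word english_token conjugations tense _
  unfold Spec_apply_conjugation_for_token apply_conjugation_for_token apply_conjugation_for_token_alt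
  unfold pvIndexB
  rw [foldl_fst_get, PySem.Dict.getD_eq_get?_getD, foldl_snd_get]
  simp only [PySem.Dict.get?_empty]
  cases pvScanA "english" (PySem.Str.lower english_token) con_word tense conjugations with
  | some r => rfl
  | none =>
    cases pvScanA "base" (PySem.Str.lower con_word) con_word tense conjugations with
    | some r => rfl
    | none => rfl
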